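-- pv_equiv track=rewrite | github.com/pypi-data/pypi-mirror-399 | packages/netcl/netcl-0.1.2-py3-none-any.whl/netcl/ops/broadcast.py | _prep_strides
-- ===== SOURCE A (Python) =====
-- from typing import Optional, Tuple
--
-- def _prep_strides(shape: Tuple[int, ...], target_ndim: int) -> Tuple[Tuple[int, ...], Tuple[int, ...]]:
--     """
--     Returns (dims, strides) padded to target_ndim for row-major layout.
--     """
--     dims = (1,) * (target_ndim - len(shape)) + tuple(shape)
--     # compute C-order strides
--     strides = [0] * target_ndim
--     stride = 1
--     for i in range(target_ndim - 1, -1, -1):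
--         strides[i] = 0 if dims[i] == 1 else stride
--         stride *= dims[i]
--     return tuple(dims), tuple(strides)
-- ===== SOURCE B (Python) =====
-- def _suffix_prod(dims, i, n):
--     p = 1
--     for d in dims[i:n]:
--         p *= d
--     return p
--
-- def _prep_strides(shape, target_ndim):
--     dims = (1,) * (target_ndim - len(shape)) + tuple(shape)
--     strides = tuple(
--         0 if dims[i] == 1 else _suffix_prod(dims, i + 1, target_ndim)
--         for i in range(target_ndim)
--     )
--     return tuple(dims), strides
-- ===== Notes on version B (the rewrite author's own statement) =====
-- stated objective: alternative
-- what changed: The backward loop threading a running stride accumulator and mutating a preallocated strides list is replaced by a forward per-position computation: each stride is an independent suffix product of the trailing dims (recomputed from a slice), with no accumulator and no mutation.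
import Mathlib
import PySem

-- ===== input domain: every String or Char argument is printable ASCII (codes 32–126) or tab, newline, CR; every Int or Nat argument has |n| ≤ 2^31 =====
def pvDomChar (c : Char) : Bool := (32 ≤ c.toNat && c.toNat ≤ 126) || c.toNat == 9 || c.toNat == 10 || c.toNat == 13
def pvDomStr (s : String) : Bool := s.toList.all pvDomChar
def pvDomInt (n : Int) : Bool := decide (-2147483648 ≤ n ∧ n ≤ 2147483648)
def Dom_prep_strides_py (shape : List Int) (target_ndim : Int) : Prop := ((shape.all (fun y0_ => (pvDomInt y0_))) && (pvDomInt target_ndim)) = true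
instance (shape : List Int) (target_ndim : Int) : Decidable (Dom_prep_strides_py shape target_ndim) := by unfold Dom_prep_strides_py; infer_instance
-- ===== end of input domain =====

-- B replaces A's backward accumulator loop by independent per-position suffix products (alternative decomposition, no speed claim).

-- ===== PORT A =====
-- the loop 'for i in range(target_ndim-1, -1, -1)', as a descending recursion:
-- with k+1 iterations left the current index is i = k; state = (strides, stride).
def prepAStridesLoop (dims : List Int) (k : Nat) (strides : List Int) (stride : Int) :
    List Int × Int :=
  match k with
  | 0 => (strides, stride)
  | k + 1 =>
    let d := PySem.List.pyGetD dims (k : Int) 0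
    prepAStridesLoop dims k (strides.set k (if d = 1 then 0 else stride)) (stride * d)

def prep_strides_py (shape : List Int) (target_ndim : Int) : List Int × List Int :=
  let dims := List.replicate (target_ndim - shape.length).toNat 1 ++ shape
  let strides0 := List.replicate target_ndim.toNat 0
  let res := prepAStridesLoop dims target_ndim.toNat strides0 1
  (dims, res.1)

-- ===== PORT B =====
-- helper _suffix_prod(dims, i, n): p = 1; for d in dims[i:n]: p *= d
def suffixProd (dims : List Int) (i n : Int) : Int :=
  (PySem.List.slice dims (some i) (some n)).foldl (· * ·) 1

def prep_strides_py_alt (shape : List Int) (target_ndim : Int) : List Int × List Int :=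
  let dims := List.replicate (target_ndim - shape.length).toNat 1 ++ shape
  let strides := (List.range target_ndim.toNat).map (fun (i : Nat) =>
    if PySem.List.pyGetD dims (i : Int) 0 = 1 then 0
    else suffixProd dims ((i : Int) + 1) target_ndim)
  (dims, strides)

-- ===== PRECONDITION & SPEC =====
def Spec_prep_strides_py (shape : List Int) (target_ndim : Int) (out : List Int × List Int) : Prop := out = prep_strides_py_alt shape target_ndim
instance (shape : List Int) (target_ndim : Int) (out : List Int × List Int) : Decidable (Spec_prep_strides_py shape target_ndim out) := by unfold Spec_prep_strides_py; infer_instance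

-- ===== CLAIM (what is proved, stated in full; the proofs are below) =====
def Claim_equal_prep_strides_py : Prop := ∀ (shape : List Int) (target_ndim : Int), Dom_prep_strides_py shape target_ndim → Spec_prep_strides_py shape target_ndim (prep_strides_py shape target_ndim)

-- ===== LEMMAS AND PROOFS =====

-- the intended per-index value, for dims of length ≥ n
def pvF (dims : List Int) (n : Nat) (i : Nat) : Int :=
  if dims.getD i 0 = 1 then 0 else ((dims.take n).drop (i + 1)).prod

theorem pvLoop_invariant (dims : List Int) (n : Nat) :
    ∀ (k : Nat) (s : List Int), k ≤ n → s.length = n → n ≤ dims.length →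
      (prepAStridesLoop dims k s ((dims.take n).drop k).prod).1 =
        (List.range k).map (pvF dims n) ++ s.drop k := by
  intro k
  induction k with
  | zero => intro s _ _ _; simp [prepAStridesLoop]
  | succ k ih =>
    intro s hk hs hn
    have hkd : k < dims.length := by omega
    have hdrop : (dims.take n).drop k = dims[k] :: (dims.take n).drop (k + 1) := by
      rw [List.drop_eq_getElem_cons (by simp; omega)]
      simp [List.getElem_take]
    have hget : PySem.List.pyGetD dims (k : Int) 0 = dims[k] :=
      PySem.List.pyGetD_ofNat dims k 0 hkd
    have hprod : ((dims.take n).drop k).prod = ((dims.take n).drop (k + 1)).prod * dims[k] := by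
      rw [hdrop, List.prod_cons]; ring
    have hsplit : List.range (k + 1) = List.range k ++ [k] := List.range_succ
    rw [prepAStridesLoop]
    simp only [hget]
    rw [show ((dims.take n).drop (k + 1)).prod * dims[k]
        = ((dims.take n).drop k).prod from hprod.symm]
    rw [ih _ (by omega) (by simpa using hs) hn]
    rw [hsplit]
    have hset : (s.set k (if dims[k] = 1 then (0:Int)
          else ((dims.take n).drop (k + 1)).prod)).drop k
        = (if dims[k] = 1 then (0:Int) else ((dims.take n).drop (k + 1)).prod)
            :: s.drop (k + 1) := by
      rw [List.drop_eq_getElem_cons (by simp; omega)]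
      simp [List.drop_set_of_lt (show k < k + 1 by omega)]
    rw [hset]
    simp [pvF, List.getD_eq_getElem?_getD, hkd]

theorem prep_strides_py_spec : Claim_equal_prep_strides_py := by
  intro shape tn _
  unfold Spec_prep_strides_py prep_strides_py prep_strides_py_alt
  set dims := List.replicate (tn - shape.length).toNat 1 ++ shape with hdims
  set n := tn.toNat with hn
  have hlen : n ≤ dims.length := by
    simp only [hdims, List.length_append, List.length_replicate]
    omega
  refine Prod.ext rfl ?_
  show (prepAStridesLoop dims n (List.replicate n 0) 1).1 =
    (List.range n).map (fun (i : Nat) =>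
      if PySem.List.pyGetD dims (i : Int) 0 = 1 then 0
      else suffixProd dims ((i : Int) + 1) tn)
  have h1 : ((dims.take n).drop n).prod = 1 := by
    rw [List.drop_eq_nil_of_le (by simp), List.prod_nil]
  have inv := pvLoop_invariant dims n n (List.replicate n 0) le_rfl (by simp) hlen
  rw [h1] at inv
  rw [inv, List.drop_eq_nil_of_le (by simp), List.append_nil]
  apply List.map_congr_left
  intro i hi
  have hin : i < n := List.mem_range.mp hi
  have htn : (n : Int) = tn := by omega
  have hid : i < dims.length := by omega
  simp only [pvF]
  rw [PySem.List.pyGetD_ofNat dims i 0 hid,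
    List.getD_eq_getElem?_getD, List.getElem?_eq_getElem hid]
  simp only [Option.getD_some]
  congr 1
  unfold suffixProd
  rw [← htn, show ((i:Int)+1) = ((i+1:Nat):Int) from by omega,
    PySem.List.slice_natCast]
  rw [show (dims.drop (i+1)).take (n - (i+1)) = (dims.take n).drop (i+1) from by
    rw [List.drop_take]]
  exact List.prod_eq_foldl
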